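-- pv_equiv track=rewrite | github.com/daniel-reich/ubiquitous-fiesta | YRwZvg5Pkgw4pEWC5_12.py | flick_switch
-- ===== SOURCE A (Python) =====
-- def flick_switch(lst):
--   change = True
--   list = []
--   for i in lst:
--     if i == "flick":
--       change = not change
--     list.append(change)
--   return list
-- ===== SOURCE B (Python) =====
-- def flick_switch(lst):
--     # Run-length construction: locate the "flick" positions first, then emit
--     # constant runs between them (start state True; value flips at each flick).
--     out = []
--     state = False          # parity of flicks seen so far
--     start = 0
--     for idx in [k for k, x in enumerate(lst) if x == "flick"]:
--         out += [not state] * (idx - start)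
--         state = not state
--         out.append(not state)
--         start = idx + 1
--     out += [not state] * (len(lst) - start)
--     return out
-- ===== Notes on version B (the rewrite author's own statement) =====
-- stated objective: alternative
-- what changed: Replaces the per-element toggle loop by a run-length construction: first collect the indices of 'flick' tokens, then emit constant blocks between consecutive flick positions via list repetition.
import Mathlib
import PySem

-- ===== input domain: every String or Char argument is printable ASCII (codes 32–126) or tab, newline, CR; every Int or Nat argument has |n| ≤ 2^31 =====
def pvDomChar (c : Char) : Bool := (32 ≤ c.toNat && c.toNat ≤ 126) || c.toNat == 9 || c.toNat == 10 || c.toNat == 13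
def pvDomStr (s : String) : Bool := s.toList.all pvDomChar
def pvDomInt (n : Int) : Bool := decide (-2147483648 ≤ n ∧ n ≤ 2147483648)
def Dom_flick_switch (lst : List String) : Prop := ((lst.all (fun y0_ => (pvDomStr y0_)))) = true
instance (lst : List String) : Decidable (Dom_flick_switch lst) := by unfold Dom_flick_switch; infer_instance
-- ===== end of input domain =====

-- B replaces the per-element toggle loop by a run-length construction over the "flick"
-- positions (objective: alternative decomposition, same O(n) cost).

-- ===== PORT A =====
-- A's loop: state (change, list); toggle on "flick", append current state.
def flick_switch (lst : List String) : List Bool :=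
  (lst.foldl (fun (acc : Bool × List Bool) (i : String) =>
      let change := if i == "flick" then !acc.1 else acc.1
      (change, acc.2 ++ [change]))
    (true, [])).2

-- ===== PORT B =====
-- [k for k, x in enumerate(lst) if x == "flick"]  (zipIdx pairs are (x, k))
def pvFlickIdxs (lst : List String) : List Nat :=
  (lst.zipIdx.filter (fun p => p.1 == "flick")).map (fun p => p.2)

-- one iteration of B's loop; acc = (out, state, start)
def pvBStep (acc : List Bool × Bool × Nat) (idx : Nat) : List Bool × Bool × Nat :=
  (acc.1 ++ List.replicate (idx - acc.2.2) (!acc.2.1) ++ [acc.2.1], !acc.2.1, idx + 1)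

def flick_switch_alt (lst : List String) : List Bool :=
  let fin := (pvFlickIdxs lst).foldl pvBStep ([], false, 0)
  fin.1 ++ List.replicate (lst.length - fin.2.2) (!fin.2.1)

-- ===== PRECONDITION & SPEC =====
def Spec_flick_switch (lst : List String) (out : List Bool) : Prop := out = flick_switch_alt lst
instance (lst : List String) (out : List Bool) : Decidable (Spec_flick_switch lst out) := by unfold Spec_flick_switch; infer_instance

-- ===== CLAIM (what is proved, stated in full; the proofs are below) =====
def Claim_equal_flick_switch : Prop := ∀ (lst : List String), Dom_flick_switch lst → Spec_flick_switch lst (flick_switch lst)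

-- ===== LEMMAS AND PROOFS =====

-- A's fold, named for the proofs
def pvAStep (acc : Bool × List Bool) (i : String) : Bool × List Bool :=
  let change := if i == "flick" then !acc.1 else acc.1
  (change, acc.2 ++ [change])

lemma pvFlickIdxs_concat (xs : List String) (x : String) :
    pvFlickIdxs (xs ++ [x]) =
      pvFlickIdxs xs ++ (if x == "flick" then [xs.length] else []) := by
  unfold pvFlickIdxs
  rw [List.zipIdx_append]
  simp only [List.filter_append, List.map_append]
  by_cases h : x == "flick" <;> simp [h, List.zipIdx]

-- the loop invariant tying A's fold state to B's fold state
lemma pvInvariant (lst : List String) :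
    let a := lst.foldl pvAStep (true, [])
    let b := (pvFlickIdxs lst).foldl pvBStep ([], false, 0)
    b.2.1 = !a.1 ∧ b.2.2 ≤ lst.length ∧
      a.2 = b.1 ++ List.replicate (lst.length - b.2.2) a.1 := by
  induction lst using List.reverseRecOn with
  | nil => simp [pvFlickIdxs]
  | append_singleton xs x ih =>
    obtain ⟨h1, h2, h3⟩ := ih
    rw [List.foldl_append, pvFlickIdxs_concat]
    by_cases hx : x == "flick"
    · simp only [hx, if_pos, List.foldl_append, List.foldl_cons, List.foldl_nil]
      refine ⟨?_, ?_, ?_⟩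
      · simp [pvBStep, pvAStep, hx, h1]
      · simp [pvBStep]
      · simp only [pvBStep, pvAStep, hx, if_pos, h3, h1]
        simp [Bool.not_not]
    · simp only [if_neg hx, List.append_nil, List.foldl_cons, List.foldl_nil]
      have hA : pvAStep (xs.foldl pvAStep (true, [])) x =
          ((xs.foldl pvAStep (true, [])).1,
           (xs.foldl pvAStep (true, [])).2 ++ [(xs.foldl pvAStep (true, [])).1]) := by
        simp [pvAStep, hx]
      refine ⟨?_, le_trans h2 (by simp), ?_⟩
      · rw [hA]; exact h1
      · rw [hA, h3, List.length_append, List.length_singleton,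
          Nat.sub_add_comm h2, List.replicate_add, List.replicate_one, List.append_assoc]

-- ===== VERDICT (by name: the statement is the Claim_ definition above) =====
theorem flick_switch_spec : Claim_equal_flick_switch := by
  intro lst _
  unfold Spec_flick_switch flick_switch flick_switch_alt
  have h := pvInvariant lst
  obtain ⟨h1, h2, h3⟩ := h
  show (lst.foldl pvAStep (true, [])).2 = _
  simp only [h3, h1, Bool.not_not]
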